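-- pv_equiv track=rewrite | github.com/ustankie/ASD | exams/2020-21/2 termin/again/zad1_1.py | DFS
-- ===== SOURCE A (Python) =====
-- def DFS(G, x, m):
--     n = len(G)
--     vis = [False for _ in range(n)]
--     P = [False for _ in range(m)]
--
--     def recur(u):
--         for v, i in G[u]:
--             P[i] = True
--
--             if not vis[v]:
--                 vis[v] = True
--                 recur(v)
--
--     vis[x] = True
--     recur(x)
--
--     return P
-- ===== SOURCE B (Python) =====
-- def DFS(G, x, m):
--     n = len(G)
--     vis = [False] * n
--     P = [False] * m
--     vis[x] = True
--     stack = [iter(G[x])]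
--     while stack:
--         e = next(stack[-1], None)
--         if e is None:
--             stack.pop()
--             continue
--         v, i = e
--         P[i] = True
--         if not vis[v]:
--             vis[v] = True
--             stack.append(iter(G[v]))
--     return P
-- ===== Notes on version B (the rewrite author's own statement) =====
-- stated objective: alternative
-- what changed: The recursive DFS (nested closure function recur) is replaced by an iterative while-loop over an explicit stack of adjacency-list iterators; same O(V+E) marking work, no Python recursion.
import Mathlib
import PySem

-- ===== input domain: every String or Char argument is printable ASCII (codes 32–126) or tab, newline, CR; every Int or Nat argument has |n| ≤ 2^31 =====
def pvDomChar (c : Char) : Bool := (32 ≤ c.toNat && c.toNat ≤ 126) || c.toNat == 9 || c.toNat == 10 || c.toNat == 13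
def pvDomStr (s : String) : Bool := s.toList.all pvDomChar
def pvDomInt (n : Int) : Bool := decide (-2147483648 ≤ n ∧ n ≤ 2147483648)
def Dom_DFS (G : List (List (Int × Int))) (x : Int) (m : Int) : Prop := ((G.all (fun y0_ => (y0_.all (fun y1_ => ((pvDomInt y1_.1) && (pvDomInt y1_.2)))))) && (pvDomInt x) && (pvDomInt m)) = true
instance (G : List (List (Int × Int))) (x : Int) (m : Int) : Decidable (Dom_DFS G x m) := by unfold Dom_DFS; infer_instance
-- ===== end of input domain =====

-- B replaces A's recursive DFS by an iterative loop over an explicit stack of adjacency-list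
-- iterators (objective: alternative decomposition; same O(V+E) marking work, no Python recursion).
-- Note: Python A can hit the interpreter's recursion limit on very deep graphs while B does not;
-- that resource limit is not modelled here.

-- ===== PORT A =====
-- fuel = recursion-depth guard: each nested recur call gets one unit less; with initial fuel
-- G.length it is never exhausted when x is a valid index (each nested call newly visits a vertex).
mutual
def pvRecurA (G : List (List (Int × Int))) : Nat → Int → List Bool × List Bool → List Bool × List Bool
  | 0, _, st => st
  | f+1, u, st => pvGoA G f (PySem.List.pyGetD G u []) st
  termination_by f _ _ => (f, 0, 0)

def pvGoA (G : List (List (Int × Int))) : Nat → List (Int × Int) → List Bool × List Bool → List Bool × List Bool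
  | _, [], st => st
  | f, (v, i) :: rest, st =>
      let st1 : List Bool × List Bool := (st.1, PySem.List.pySetD st.2 i true)
      if PySem.List.pyGetD st.1 v false = true then
        pvGoA G f rest st1
      else
        pvGoA G f rest (pvRecurA G f v (PySem.List.pySetD st.1 v true, st1.2))
  termination_by f l _ => (f, 1, l.length)
end

def DFS (G : List (List (Int × Int))) (x : Int) (m : Int) : List Bool :=
  let n := G.length
  let vis := List.replicate n false
  let P := List.replicate m.toNat false
  let vis := PySem.List.pySetD vis x true
  (pvRecurA G n x (vis, P)).2

-- ===== PORT B =====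
-- iterative DFS: the stack holds the not-yet-consumed remainders of adjacency lists (Source B's
-- iterators); fuel decreases only when a new vertex is pushed, and with the generous initial
-- fuel chosen in DFS_alt it is never exhausted when x is a valid index.
def pvLoopB (G : List (List (Int × Int))) : Nat → List (List (Int × Int)) → List Bool × List Bool → List Bool × List Bool
  | _, [], st => st
  | f, [] :: S, st => pvLoopB G f S st
  | f, ((v, i) :: rest) :: S, st =>
      let st1 : List Bool × List Bool := (st.1, PySem.List.pySetD st.2 i true)
      if PySem.List.pyGetD st.1 v false = true then
        pvLoopB G f (rest :: S) st1
      else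
        match f with
        | 0 => st1
        | f+1 => pvLoopB G f (PySem.List.pyGetD G v [] :: rest :: S) (PySem.List.pySetD st.1 v true, st1.2)
  termination_by f S _ => (f, (S.map List.length).sum, S.length)

def DFS_alt (G : List (List (Int × Int))) (x : Int) (m : Int) : List Bool :=
  let n := G.length
  let E := (G.map List.length).sum
  let vis := List.replicate n false
  let P := List.replicate m.toNat false
  let vis := PySem.List.pySetD vis x true
  (pvLoopB G (n * (E + 1) + E + 1) [PySem.List.pyGetD G x []] (vis, P)).2

-- ===== PRECONDITION & SPEC =====
-- the vertices A's traversal visits: the closure of {x} under edges with in-range endpoints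
def pvIdxs (G : List (List (Int × Int))) (R : List Nat) : List Nat :=
  R.flatMap (fun a => (G.getD a []).filterMap (fun e => PySem.List.pyIdx? G.length e.1))

def pvReach (G : List (List (Int × Int))) (x : Int) : List Nat :=
  (List.range G.length).foldl
    (fun R _ => R ++ ((pvIdxs G R).filter (fun b => !(R.contains b))))
    ((PySem.List.pyIdx? G.length x).toList)

-- Pre_ is exactly the set of inputs on which Python A returns: x is a valid Python index of G and
-- every edge out of a vertex A visits (the closure pvReach) has an in-range endpoint and edge index
-- (otherwise A raises IndexError at vis[x], vis[v] or P[i]).  The proof of the claim uses only the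
-- first conjunct — the ports agree even where a visited edge is out of range — the second conjunct
-- only pins Pre_ to A's true domain.
def Pre_DFS (G : List (List (Int × Int))) (x : Int) (m : Int) : Prop :=
  PySem.Raise.InRange G.length x ∧
  ∀ a ∈ pvReach G x, ∀ e ∈ G.getD a [],
    PySem.Raise.InRange G.length e.1 ∧ PySem.Raise.InRange m.toNat e.2
instance (G : List (List (Int × Int))) (x : Int) (m : Int) : Decidable (Pre_DFS G x m) := by
  unfold Pre_DFS; infer_instance

def pvWitness_DFS : (List (List (Int × Int))) × Int × Int := ([[(1, 0), (0, 1)], []], 0, 2)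

def Spec_DFS (G : List (List (Int × Int))) (x : Int) (m : Int) (out : List Bool) : Prop := out = DFS_alt G x m
instance (G : List (List (Int × Int))) (x : Int) (m : Int) (out : List Bool) : Decidable (Spec_DFS G x m out) := by unfold Spec_DFS; infer_instance

-- ===== CLAIM (what is proved, stated in full; the proofs are below) =====
def Claim_equal_DFS : Prop := ∀ (G : List (List (Int × Int))) (x : Int) (m : Int), Dom_DFS G x m → Pre_DFS G x m → Spec_DFS G x m (DFS G x m)

-- ===== LEMMAS AND PROOFS =====

-- the B-side fuel potential: every fuel decrement of pvLoopB lowers it by at least one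
def pvPhi (G : List (List (Int × Int))) (S : List (List (Int × Int)))
    (st : List Bool × List Bool) : Nat :=
  st.1.count false * ((G.map List.length).sum + 1) + (S.map List.length).sum

-- a Python index that is in range normalises to one Nat position, for reading and writing alike
lemma pv_norm {α : Type} (l : List α) (i : Int) (h : PySem.Raise.InRange l.length i) :
    ∃ k : Nat, k < l.length ∧ (∀ d, PySem.List.pyGetD l i d = l.getD k d) ∧
      (∀ v, PySem.List.pySetD l i v = l.set k v) := by
  obtain ⟨h1, h2⟩ := h
  unfold PySem.List.pyGetD PySem.List.pyGet? PySem.List.pySetD PySem.List.pySet? PySem.List.pyIdx?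
  by_cases h0 : 0 ≤ i
  · have hlt : i < (l.length : Int) := h2
    refine ⟨i.toNat, by omega, ?_, ?_⟩
    · intro d; simp [h0, hlt, List.getD_eq_getElem?_getD]
    · intro v; simp [h0, hlt]
  · refine ⟨l.length - (-i).toNat, by omega, ?_, ?_⟩
    · intro d; simp [h0, h1, List.getD_eq_getElem?_getD]
    · intro v; simp [h0, h1]

-- out-of-range Python reads give the default and out-of-range writes do nothing
lemma pv_invalid_get {α : Type} (l : List α) (i : Int) (d : α)
    (h : ¬ PySem.Raise.InRange l.length i) : PySem.List.pyGetD l i d = d := by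
  have hnone : PySem.List.pyGet? l i = none := by
    rw [PySem.List.pyGet?_eq_none_iff]; exact h
  simp [PySem.List.pyGetD, hnone]

lemma pv_invalid_set {α : Type} (l : List α) (i : Int) (v : α)
    (h : ¬ PySem.Raise.InRange l.length i) : PySem.List.pySetD l i v = l := by
  have hnone : PySem.List.pySet? l i v = none := by
    rw [PySem.List.pySet?_eq_none_iff]; exact h
  simp [PySem.List.pySetD, hnone]

-- visiting an unvisited in-range vertex removes exactly one `false` from vis
lemma pv_visit (l : List Bool) (v : Int) (h : PySem.Raise.InRange l.length v)
    (hf : ¬ PySem.List.pyGetD l v false = true) :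
    (PySem.List.pySetD l v true).count false + 1 = l.count false := by
  obtain ⟨k, hk, hget, hset⟩ := pv_norm l v h
  have hkv : l[k] = false := by
    have h1 := hget false
    rw [List.getD_eq_getElem?_getD, List.getElem?_eq_getElem hk] at h1
    simp only [Option.getD_some] at h1
    simp only [Bool.not_eq_true] at hf
    rw [← h1]; exact hf
  rw [hset, List.count_set hk]
  simp [hkv]
  have : 0 < l.count false := List.count_pos_iff.mpr (hkv ▸ List.getElem_mem hk)
  omega

-- setting any cell to true never increases the number of `false`s
lemma pv_set_le (l : List Bool) (i : Int) :
    (PySem.List.pySetD l i true).count false ≤ l.count false := by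
  by_cases h : PySem.Raise.InRange l.length i
  · obtain ⟨k, hk, _, hset⟩ := pv_norm l i h
    rw [hset, List.count_set hk]
    simp
  · rw [pv_invalid_set l i true h]

-- sweeping the adjacency list of an out-of-range vertex is a no-op (its list reads as [])
lemma pv_recurA_invalid (G : List (List (Int × Int))) (f : Nat) (v : Int)
    (st : List Bool × List Bool) (h : ¬ PySem.Raise.InRange G.length v) :
    pvRecurA G f v st = st := by
  cases f with
  | zero => rw [pvRecurA]
  | succ g =>
    rw [pvRecurA]
    have : PySem.List.pyGetD G v ([] : List (Int × Int)) = [] := pv_invalid_get G v [] h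
    rw [this, pvGoA]

-- the A-side loop only turns `false`s of vis into `true`s, and never changes vis's length
lemma pv_goA_invar (G : List (List (Int × Int))) :
    ∀ f l st, ((pvGoA G f l st).1.count false ≤ st.1.count false) ∧
      (pvGoA G f l st).1.length = st.1.length := by
  intro f
  induction f using Nat.strong_induction_on with
  | _ f IHf =>
  intro l
  induction l with
  | nil => intro st; simp [pvGoA]
  | cons e rest IHl =>
    intro st
    obtain ⟨v, i⟩ := e
    rw [pvGoA]
    by_cases hv : PySem.List.pyGetD st.1 v false = true
    · simp only [hv, if_pos]
      exact IHl (st.1, PySem.List.pySetD st.2 i true)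
    · simp only [hv, if_neg, Bool.false_eq_true, not_false_eq_true]
      set st2 : List Bool × List Bool :=
        (PySem.List.pySetD st.1 v true, PySem.List.pySetD st.2 i true) with hst2
      have hrec : ((pvRecurA G f v st2).1.count false ≤ st2.1.count false) ∧
          (pvRecurA G f v st2).1.length = st2.1.length := by
        cases f with
        | zero => simp [pvRecurA]
        | succ g =>
          rw [pvRecurA]
          exact IHf g (Nat.lt_succ_self g) _ st2
      have h3 := IHl (pvRecurA G f v st2)
      have h4 : st2.1.count false ≤ st.1.count false := pv_set_le _ _
      have h5 : st2.1.length = st.1.length := PySem.List.length_pySetD _ _ _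
      exact ⟨le_trans h3.1 (le_trans hrec.1 h4), by rw [h3.2, hrec.2, h5]⟩

lemma pv_recurA_invar (G : List (List (Int × Int))) (f : Nat) (u : Int)
    (st : List Bool × List Bool) :
    ((pvRecurA G f u st).1.count false ≤ st.1.count false) ∧
      (pvRecurA G f u st).1.length = st.1.length := by
  cases f with
  | zero => simp [pvRecurA]
  | succ g => rw [pvRecurA]; exact pv_goA_invar G g _ st

-- an adjacency list never holds more edges than the whole graph
lemma pv_adj_le (G : List (List (Int × Int))) (v : Int) :
    (PySem.List.pyGetD G v ([] : List (Int × Int))).length ≤ (G.map List.length).sum := by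
  by_cases h : PySem.Raise.InRange G.length v
  · exact List.single_le_sum (fun a _ => Nat.zero_le a) _
      (List.mem_map_of_mem (PySem.List.pyGetD_mem G [] h))
  · rw [pv_invalid_get G v [] h]; simp

-- one-step unfolding of the stack machine on a non-empty top-of-stack (its equations split on fuel)
lemma pvLoopB_cons (G : List (List (Int × Int))) (f : Nat) (v i : Int)
    (rest : List (Int × Int)) (S : List (List (Int × Int))) (st : List Bool × List Bool) :
    pvLoopB G f (((v, i) :: rest) :: S) st =
      if PySem.List.pyGetD st.1 v false = true then
        pvLoopB G f (rest :: S) (st.1, PySem.List.pySetD st.2 i true)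
      else
        match f with
        | 0 => (st.1, PySem.List.pySetD st.2 i true)
        | g+1 => pvLoopB G g (PySem.List.pyGetD G v [] :: rest :: S)
            (PySem.List.pySetD st.1 v true, PySem.List.pySetD st.2 i true) := by
  cases f with
  | zero => rw [pvLoopB.eq_3]
  | succ g => rw [pvLoopB.eq_4]

-- with enough fuel, the A-side result does not depend on the exact fuel
lemma pv_irrel_A (G : List (List (Int × Int))) :
    ∀ f f' l st, st.1.length = G.length →
      st.1.count false ≤ f → st.1.count false ≤ f' →
      pvGoA G f l st = pvGoA G f' l st := by
  intro f
  induction f using Nat.strong_induction_on with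
  | _ f IHf =>
  intro f' l
  induction l with
  | nil => intro st _ _ _; simp [pvGoA]
  | cons e rest IHl =>
    intro st hlen hf hf'
    obtain ⟨v, i⟩ := e
    rw [pvGoA, pvGoA]
    by_cases hv : PySem.List.pyGetD st.1 v false = true
    · simp only [hv, if_pos]
      exact IHl (st.1, PySem.List.pySetD st.2 i true) hlen hf hf'
    · simp only [hv, if_neg, Bool.false_eq_true, not_false_eq_true]
      set st2 : List Bool × List Bool :=
        (PySem.List.pySetD st.1 v true, PySem.List.pySetD st.2 i true) with hst2
      have hlen2 : st2.1.length = G.length := by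
        rw [← hlen]; exact PySem.List.length_pySetD _ _ _
      by_cases hvr : PySem.Raise.InRange st.1.length v
      · have hcnt := pv_visit st.1 v hvr hv
        have hc2 : st2.1.count false + 1 = st.1.count false := hcnt
        obtain ⟨g, rfl⟩ : ∃ g, f = g + 1 := ⟨f - 1, by omega⟩
        obtain ⟨g', rfl⟩ : ∃ g', f' = g' + 1 := ⟨f' - 1, by omega⟩
        have hrec : pvRecurA G (g + 1) v st2 = pvRecurA G (g' + 1) v st2 := by
          rw [pvRecurA, pvRecurA]
          exact IHf g (by omega) g' _ st2 hlen2 (by omega) (by omega)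
        rw [hrec]
        have hinv := pv_recurA_invar G (g' + 1) v st2
        exact IHl (pvRecurA G (g' + 1) v st2) (by rw [hinv.2, hlen2]) (by omega) (by omega)
      · have hvrG : ¬ PySem.Raise.InRange G.length v := by rw [← hlen]; exact hvr
        have hid : st2.1 = st.1 := by rw [hst2]; exact pv_invalid_set st.1 v true hvr
        rw [pv_recurA_invalid G f v st2 hvrG, pv_recurA_invalid G f' v st2 hvrG]
        exact IHl st2 (by rw [hid, hlen]) (by rw [hid]; omega) (by rw [hid]; omega)

-- with enough fuel (measured by the potential pvPhi), neither does the B-side result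
lemma pv_irrel_B (G : List (List (Int × Int))) :
    ∀ f f' S st, st.1.length = G.length →
      pvPhi G S st ≤ f → pvPhi G S st ≤ f' →
      pvLoopB G f S st = pvLoopB G f' S st := by
  intro f
  induction f using Nat.strong_induction_on with
  | _ f IHf =>
  intro f' S
  induction S with
  | nil => intro st _ _ _; simp [pvLoopB]
  | cons l S IHS =>
    induction l with
    | nil =>
      intro st hlen hf hf'
      rw [pvLoopB, pvLoopB]
      refine IHS st hlen ?_ ?_ <;> simp only [pvPhi, List.map_cons, List.length_nil,
        List.sum_cons, Nat.zero_add] at hf hf' ⊢ <;> omega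
    | cons e rest IHl =>
      intro st hlen hf hf'
      obtain ⟨v, i⟩ := e
      rw [pvLoopB_cons, pvLoopB_cons]
      simp only [pvPhi, List.map_cons, List.sum_cons, List.length_cons] at hf hf'
      by_cases hv : PySem.List.pyGetD st.1 v false = true
      · simp only [hv, if_pos]
        refine IHl (st.1, PySem.List.pySetD st.2 i true) hlen ?_ ?_ <;>
          simp only [pvPhi, List.map_cons, List.sum_cons] <;> omega
      · simp only [hv, if_neg, Bool.false_eq_true, not_false_eq_true]
        have hE : 1 ≤ st.1.count false * ((G.map List.length).sum + 1) +
            (rest.length + 1 + (S.map List.length).sum) := by omega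
        obtain ⟨g, rfl⟩ : ∃ g, f = g + 1 := ⟨f - 1, by omega⟩
        obtain ⟨g', rfl⟩ : ∃ g', f' = g' + 1 := ⟨f' - 1, by omega⟩
        have hlen2 : (PySem.List.pySetD st.1 v true).length = G.length := by
          rw [← hlen]; exact PySem.List.length_pySetD _ _ _
        have hadj := pv_adj_le G v
        by_cases hvr : PySem.Raise.InRange st.1.length v
        · have hcnt := pv_visit st.1 v hvr hv
          refine IHf g (by omega) g' _ _ hlen2 ?_ ?_ <;>
            simp only [pvPhi, List.map_cons, List.sum_cons] <;> nlinarith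
        · have hid : PySem.List.pySetD st.1 v true = st.1 :=
            pv_invalid_set st.1 v true hvr
          have hadj0 : PySem.List.pyGetD G v ([] : List (Int × Int)) = [] :=
            pv_invalid_get G v [] (by rw [← hlen]; exact hvr)
          refine IHf g (by omega) g' _ _ hlen2 ?_ ?_ <;>
            simp only [pvPhi, List.map_cons, List.sum_cons, hid, hadj0,
              List.length_nil] <;> omega

-- the simulation: running the stack machine on `l :: S` first performs exactly A's
-- recursive sweep of `l`, then continues with the rest of the stack
lemma pv_sim (G : List (List (Int × Int))) :
    ∀ fB fA l S st, st.1.length = G.length → st.1.count false ≤ fA →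
      pvPhi G (l :: S) st ≤ fB →
      pvLoopB G fB (l :: S) st = pvLoopB G fB S (pvGoA G fA l st) := by
  intro fB
  induction fB using Nat.strong_induction_on with
  | _ fB IHf =>
  intro fA l
  induction l with
  | nil => intro S st _ _ _; rw [pvLoopB]; simp [pvGoA]
  | cons e rest IHl =>
    intro S st hlen hfA hfB
    obtain ⟨v, i⟩ := e
    rw [pvLoopB_cons, pvGoA]
    simp only [pvPhi, List.map_cons, List.sum_cons, List.length_cons] at hfB
    by_cases hv : PySem.List.pyGetD st.1 v false = true
    · simp only [hv, if_pos]
      refine IHl S (st.1, PySem.List.pySetD st.2 i true) hlen hfA ?_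
      simp only [pvPhi, List.map_cons, List.sum_cons]; omega
    · simp only [hv, if_neg, Bool.false_eq_true, not_false_eq_true]
      set st2 : List Bool × List Bool :=
        (PySem.List.pySetD st.1 v true, PySem.List.pySetD st.2 i true) with hst2
      have hlen2 : st2.1.length = G.length := by
        rw [← hlen]; exact PySem.List.length_pySetD _ _ _
      have hadj := pv_adj_le G v
      obtain ⟨g, rfl⟩ : ∃ g, fB = g + 1 := ⟨fB - 1, by omega⟩
      change pvLoopB G g (PySem.List.pyGetD G v [] :: rest :: S) st2 = _
      by_cases hvr : PySem.Raise.InRange st.1.length v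
      · -- a genuinely new vertex is visited
        have hcnt := pv_visit st.1 v hvr hv
        have hc2 : st2.1.count false + 1 = st.1.count false := hcnt
        obtain ⟨h, rfl⟩ : ∃ h, fA = h + 1 := ⟨fA - 1, by omega⟩
        have hcle : st.1.count false ≤ st.1.count false * ((G.map List.length).sum + 1) :=
          Nat.le_mul_of_pos_right _ (by omega)
        have step1 : pvLoopB G g (PySem.List.pyGetD G v [] :: rest :: S) st2 =
            pvLoopB G g (rest :: S) (pvGoA G g (PySem.List.pyGetD G v []) st2) := by
          refine IHf g (by omega) g _ _ st2 hlen2 (by omega) ?_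
          simp only [pvPhi, List.map_cons, List.sum_cons]; nlinarith
        set st3 : List Bool × List Bool := pvGoA G g (PySem.List.pyGetD G v []) st2 with hst3
        have hinv3 := pv_goA_invar G g (PySem.List.pyGetD G v []) st2
        rw [← hst3] at hinv3
        have hlen3 : st3.1.length = G.length := by rw [hinv3.2, hlen2]
        have hc3 : st3.1.count false ≤ st2.1.count false := hinv3.1
        have step2 : pvLoopB G g (rest :: S) st3 = pvLoopB G (g + 1) (rest :: S) st3 := by
          refine pv_irrel_B G g (g + 1) (rest :: S) st3 hlen3 ?_ ?_ <;>
            simp only [pvPhi, List.map_cons, List.sum_cons] <;> nlinarith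
        have step3 : pvLoopB G (g + 1) (rest :: S) st3 =
            pvLoopB G (g + 1) S (pvGoA G (h + 1) rest st3) := by
          refine IHl S st3 hlen3 (by omega) ?_
          simp only [pvPhi, List.map_cons, List.sum_cons]; nlinarith
        have hrec : pvRecurA G (h + 1) v st2 = st3 := by
          rw [pvRecurA, hst3]
          exact pv_irrel_A G h g _ st2 hlen2 (by omega) (by omega)
        rw [step1, step2, step3, hrec]
      · -- the "visited" vertex is out of range: both sides do nothing
        have hvrG : ¬ PySem.Raise.InRange G.length v := by rw [← hlen]; exact hvr
        have hid : st2.1 = st.1 := by rw [hst2]; exact pv_invalid_set st.1 v true hvr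
        have hadj0 : PySem.List.pyGetD G v ([] : List (Int × Int)) = [] :=
          pv_invalid_get G v [] hvrG
        rw [hadj0, pvLoopB]
        have step1 : pvLoopB G g (rest :: S) st2 = pvLoopB G (g + 1) (rest :: S) st2 := by
          refine pv_irrel_B G g (g + 1) (rest :: S) st2 (by rw [hid, hlen]) ?_ ?_ <;>
            simp only [pvPhi, List.map_cons, List.sum_cons, hid] <;> omega
        have step2 : pvLoopB G (g + 1) (rest :: S) st2 =
            pvLoopB G (g + 1) S (pvGoA G fA rest st2) := by
          refine IHl S st2 (by rw [hid, hlen]) (by rw [hid]; omega) ?_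
          simp only [pvPhi, List.map_cons, List.sum_cons, hid]; omega
        rw [step1, step2, pv_recurA_invalid G fA v st2 hvrG]

-- counting `false`s in the freshly initialised, x-visited vis array
lemma pv_init_cnt (n : Nat) (x : Int) (h : PySem.Raise.InRange n x) :
    (PySem.List.pySetD (List.replicate n false) x true).count false + 1 = n := by
  have h' : PySem.Raise.InRange (List.replicate n false : List Bool).length x := by
    simp only [List.length_replicate]; exact h
  have hf : ¬ PySem.List.pyGetD (List.replicate n false : List Bool) x false = true := by
    obtain ⟨k, hk, hget, _⟩ := pv_norm (List.replicate n false : List Bool) x h'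
    have hkn : k < n := by simpa using hk
    rw [hget]
    simp [List.getD_eq_getElem?_getD, hkn]
  have := pv_visit (List.replicate n false) x h' hf
  simpa using this

-- ===== VERDICT (by name: the statement is the Claim_ definition above) =====
theorem DFS_spec : Claim_equal_DFS := by
  intro G x m _hdom hpre
  obtain ⟨hx, -⟩ := hpre
  simp only [Spec_DFS, DFS, DFS_alt]
  obtain ⟨n', hn⟩ : ∃ n', G.length = n' + 1 := by
    obtain ⟨h1, h2⟩ := hx
    exact ⟨G.length - 1, by omega⟩
  set E := (G.map List.length).sum with hE
  set st0 : List Bool × List Bool :=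
    (PySem.List.pySetD (List.replicate G.length false) x true,
      List.replicate m.toNat false) with hst0
  have hcnt0 : st0.1.count false + 1 = G.length := pv_init_cnt G.length x hx
  have hlen0 : st0.1.length = G.length := by
    rw [hst0]
    rw [show ((PySem.List.pySetD (List.replicate G.length false) x true,
        List.replicate m.toNat false) : List Bool × List Bool).1 =
      PySem.List.pySetD (List.replicate G.length false) x true from rfl]
    rw [PySem.List.length_pySetD, List.length_replicate]
  have hadj := pv_adj_le G x
  rw [hn]
  rw [pvRecurA]
  rw [pv_sim G ((n' + 1) * (E + 1) + E + 1) n' (PySem.List.pyGetD G x []) [] st0 hlen0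
    (by omega) (by simp only [pvPhi, List.map_cons, List.sum_cons, List.map_nil,
      List.sum_nil]; nlinarith)]
  rw [pvLoopB]
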